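-- pv_equiv track=rewrite | github.com/JxLi0921/EE208-labs | lab5/code/get_picture_url.py | remove_newline
-- ===== SOURCE A (Python) =====
-- def remove_newline(content: str) -> str:
-- 	'''
-- 		remove continuous duplicate '\n' in a str.
-- 		input:
-- 			original str.
-- 		output:
-- 			new str.
-- 	'''
-- 	new_content = []
-- 	pre_newline = 0
--
-- 	for x in content:
-- 		if x != '\n':
-- 			new_content.append(x)
-- 			pre_newline = 0
-- 		elif pre_newline < 2:
-- 			new_content.append(x)
-- 			pre_newline += 1
--
-- 	return ''.join(new_content)
-- ===== SOURCE B (Python) =====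
-- def remove_newline(content: str) -> str:
--     out = []
--     i = 0
--     n = len(content)
--     while i < n:
--         if content[i] == '\n':
--             j = i
--             while j < n and content[j] == '\n':
--                 j += 1
--             out.append('\n' * min(j - i, 2))
--             i = j
--         else:
--             out.append(content[i])
--             i += 1
--     return ''.join(out)
-- ===== Notes on version B (the rewrite author's own statement) =====
-- stated objective: alternative
-- what changed: B scans whole maximal runs of newlines with an inner pointer and emits min(run,2) newlines per run, instead of A's per-character loop with a capped counter carried across iterations.
import Mathlib
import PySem

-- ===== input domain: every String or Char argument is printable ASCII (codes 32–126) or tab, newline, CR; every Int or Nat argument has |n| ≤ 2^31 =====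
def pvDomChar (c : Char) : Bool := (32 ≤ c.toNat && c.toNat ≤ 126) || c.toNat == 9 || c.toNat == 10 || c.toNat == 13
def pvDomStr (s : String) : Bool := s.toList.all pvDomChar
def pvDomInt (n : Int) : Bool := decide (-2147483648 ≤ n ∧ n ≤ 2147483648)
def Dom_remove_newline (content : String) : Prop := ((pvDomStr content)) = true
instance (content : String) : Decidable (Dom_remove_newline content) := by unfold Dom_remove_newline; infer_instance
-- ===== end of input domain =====

-- B replaces A's per-character capped-counter loop with a run-scanning pass that emits min(run,2) newlines per maximal run; alternative structure, same cost.


-- ===== PORT A =====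
-- one loop step of A: state = (new_content, pre_newline)
def rnStep (st : List Char × Int) (x : Char) : List Char × Int :=
  if x ≠ '\n' then (st.1 ++ [x], 0)
  else if st.2 < 2 then (st.1 ++ [x], st.2 + 1)
  else st

def remove_newline (content : String) : String :=
  String.mk (content.toList.foldl rnStep ([], 0)).1

-- ===== PORT B =====
-- run-scanning pass of Source B: the inner `while` that advances j over the newline
-- run is the span (takeWhile/dropWhile) of the `= '\n'` predicate
def rnAltGo : List Char → List Char
  | [] => []
  | c :: rest =>
    if h : c = '\n' then
      List.replicate (min ((c :: rest).takeWhile (· = '\n')).length 2) '\n'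
        ++ rnAltGo ((c :: rest).dropWhile (· = '\n'))
    else c :: rnAltGo rest
termination_by l => l.length
decreasing_by
  · simp [List.dropWhile, h]
    have := List.length_dropWhile_le (fun x => decide (x = '\n')) rest
    omega
  · simp

def remove_newline_alt (content : String) : String :=
  String.mk (rnAltGo content.toList)

-- ===== PRECONDITION & SPEC =====
def Spec_remove_newline (content : String) (out : String) : Prop := out = remove_newline_alt content
instance (content : String) (out : String) : Decidable (Spec_remove_newline content out) := by unfold Spec_remove_newline; infer_instance

-- ===== CLAIM (what is proved, stated in full; the proofs are below) =====
def Claim_equal_remove_newline : Prop := ∀ (content : String), Dom_remove_newline content → Spec_remove_newline content (remove_newline content)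

-- ===== LEMMAS AND PROOFS =====

-- once pre_newline = 2, further newlines are ignored
theorem rnFold_two (k : Nat) (acc : List Char) :
    List.foldl rnStep (acc, 2) (List.replicate k '\n') = (acc, 2) := by
  induction k with
  | zero => rfl
  | succ k ih => simp [List.replicate_succ, List.foldl_cons, rnStep, ih]

-- consuming a maximal newline run from pre_newline = 0 appends min k 2 newlines
theorem rnFold_run (k : Nat) (acc : List Char) (rest : List Char) :
    ∃ p, List.foldl rnStep (acc, 0) (List.replicate k '\n' ++ rest)
      = List.foldl rnStep (acc ++ List.replicate (min k 2) '\n', p) rest := by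
  match k with
  | 0 => exact ⟨0, by simp⟩
  | 1 => exact ⟨1, by simp [List.replicate_succ, rnStep]⟩
  | (n + 2) =>
    refine ⟨2, ?_⟩
    have h2 : List.replicate (n + 2) '\n' = '\n' :: '\n' :: List.replicate n '\n' := by
      simp [List.replicate_succ]
    rw [h2]
    simp only [List.cons_append, List.foldl_cons]
    have hstep : rnStep (rnStep (acc, 0) '\n') '\n' = (acc ++ ['\n', '\n'], 2) := by
      simp [rnStep]
    rw [hstep, List.foldl_append, rnFold_two]
    have hm : min (n + 2) 2 = 2 := by omega
    rw [hm]
    rfl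

theorem rnTakeWhile_replicate (l : List Char) :
    l.takeWhile (· = '\n') = List.replicate (l.takeWhile (· = '\n')).length '\n' := by
  apply List.eq_replicate_of_mem
  intro c hc
  have := List.mem_takeWhile_imp hc
  simpa using this

theorem rnMain : ∀ (n : Nat) (l : List Char) (acc : List Char), l.length ≤ n →
    (List.foldl rnStep (acc, 0) l).1 = acc ++ rnAltGo l := by
  intro n
  induction n with
  | zero =>
    intro l acc hl
    have : l = [] := List.eq_nil_of_length_eq_zero (Nat.le_zero.mp hl)
    subst this; simp [rnAltGo]
  | succ n ih =>
    intro l acc hl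
    match l with
    | [] => simp [rnAltGo]
    | c :: rest =>
      by_cases hc : c = '\n'
      · subst hc
        set t := (('\n' :: rest).takeWhile (· = '\n')) with ht
        set d := (('\n' :: rest).dropWhile (· = '\n')) with hd
        have hsplit : '\n' :: rest = List.replicate t.length '\n' ++ d := by
          conv_lhs => rw [← List.takeWhile_append_dropWhile (p := (· = '\n')) (l := '\n' :: rest)]
          rw [← ht, ← hd, ← rnTakeWhile_replicate]
        have htk : 1 ≤ t.length := by
          rw [ht]; simp [List.takeWhile]
        have hlen : t.length + d.length = rest.length + 1 := by
          have := congrArg List.length hsplit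
          simpa using this.symm
        obtain ⟨p, hp⟩ := rnFold_run t.length acc d
        have hgo : rnAltGo ('\n' :: rest) = List.replicate (min t.length 2) '\n' ++ rnAltGo d := by
          rw [rnAltGo]; simp [← ht, ← hd]
        rw [hgo]
        conv_lhs => rw [hsplit]
        rw [hp]
        match d, hd with
        | [], _ => simp [rnAltGo]
        | x :: rest', hd =>
          have hx : ¬ (x = '\n') := by
            have := List.head?_dropWhile_not (fun c => decide (c = '\n')) ('\n' :: rest)
            rw [← hd] at this
            simpa using this
          have hstep : rnStep (acc ++ List.replicate (min t.length 2) '\n', p) x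
              = (acc ++ List.replicate (min t.length 2) '\n' ++ [x], 0) := by
            simp [rnStep, hx]
          rw [List.foldl_cons, hstep]
          have hrl : rest'.length ≤ n := by
            simp at hl hlen
            omega
          rw [ih rest' _ hrl]
          have hgox : rnAltGo (x :: rest') = x :: rnAltGo rest' := by
            rw [rnAltGo]; simp [hx]
          rw [hgox]; simp
      · have hstep : rnStep (acc, 0) c = (acc ++ [c], 0) := by simp [rnStep, hc]
        rw [List.foldl_cons, hstep]
        have hrl : rest.length ≤ n := by simpa using hl
        rw [ih rest _ hrl]
        have : rnAltGo (c :: rest) = c :: rnAltGo rest := by rw [rnAltGo]; simp [hc]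
        rw [this]; simp

-- ===== VERDICT (by name: the statement is the Claim_ definition above) =====
theorem remove_newline_spec : Claim_equal_remove_newline := by
  intro content _
  unfold Spec_remove_newline remove_newline remove_newline_alt
  congr 1
  simpa using rnMain content.toList.length content.toList [] le_rfl
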